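-- pv_equiv track=rewrite | github.com/angrybirdsblanket/advent_of_code | pythonSol/2024/day9b.py | find_gap_that_fits
-- ===== SOURCE A (Python) =====
-- def find_gap_that_fits(file_table, size):
--     gap_start = -1
--     gap_size = 0
--
--     for i in range(len(file_table)):
--         if file_table[i] == '.':
--             if gap_start == -1:
--                 gap_start = i
--             gap_size += 1
--             if gap_size >= size:
--                 return gap_start
--         else:
--             gap_start = -1
--             gap_size = 0
--     return -1
-- ===== SOURCE B (Python) =====
-- def find_gap_that_fits(file_table, size):
--     pos = 0
--     n = len(file_table)
--     while pos < n:
--         j = pos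
--         while j < n and file_table[j] == file_table[pos]:
--             j += 1
--         if file_table[pos] == '.' and j - pos >= size:
--             return pos
--         pos = j
--     return -1
-- ===== Notes on version B (the rewrite author's own statement) =====
-- stated objective: alternative
-- what changed: Replaces A's per-element state machine (gap_start/gap_size counters) with a run-by-run scan that jumps over each maximal run of equal elements at once and tests a '.'-run's length against size directly.
import Mathlib
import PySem

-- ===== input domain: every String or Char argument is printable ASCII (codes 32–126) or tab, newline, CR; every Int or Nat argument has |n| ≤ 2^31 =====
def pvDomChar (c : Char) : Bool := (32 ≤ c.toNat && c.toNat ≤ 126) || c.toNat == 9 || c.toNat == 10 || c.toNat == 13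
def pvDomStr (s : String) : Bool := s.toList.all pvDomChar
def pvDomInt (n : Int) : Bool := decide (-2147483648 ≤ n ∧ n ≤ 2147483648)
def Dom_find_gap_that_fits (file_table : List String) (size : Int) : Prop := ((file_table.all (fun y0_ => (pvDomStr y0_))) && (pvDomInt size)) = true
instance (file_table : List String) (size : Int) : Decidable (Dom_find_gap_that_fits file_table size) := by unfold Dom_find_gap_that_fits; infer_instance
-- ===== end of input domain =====

-- B replaces A's per-element gap_start/gap_size state machine by a run-by-run scan
-- (jump over each maximal run of equal elements at once); alternative decomposition, same cost.

-- ===== PORT A =====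
-- A's for-loop over indices, carrying gap_start and gap_size; early return on gap_size >= size.
def pvAGo (size : Int) : List String → Int → Int → Int → Int
  | [], _i, _gap_start, _gap_size => -1
  | x :: xs, i, gap_start, gap_size =>
    if x == "." then
      let gs := if gap_start == -1 then i else gap_start
      let gz := gap_size + 1
      if size ≤ gz then gs else pvAGo size xs (i + 1) gs gz
    else pvAGo size xs (i + 1) (-1) 0

def find_gap_that_fits (file_table : List String) (size : Int) : Int :=
  pvAGo size file_table 0 (-1) 0

-- ===== PORT B =====
-- B's outer while-loop: at position pos, measure the maximal run of elements equal to the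
-- head (the inner `while j < n` loop = takeWhile), return pos for a long-enough '.'-run,
-- else skip the whole run.
def pvBGo (size : Int) : List String → Int → Int
  | [], _pos => -1
  | x :: xs, pos =>
    let run : Int := 1 + (xs.takeWhile (fun s => s == x)).length
    if x == "." && decide (size ≤ run) then pos
    else pvBGo size (xs.dropWhile (fun s => s == x)) (pos + run)
termination_by l _ => l.length
decreasing_by
  simpa using Nat.lt_succ_of_le (List.length_dropWhile_le _ _)

def find_gap_that_fits_alt (file_table : List String) (size : Int) : Int :=
  pvBGo size file_table 0

-- ===== PRECONDITION & SPEC =====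
def Spec_find_gap_that_fits (file_table : List String) (size : Int) (out : Int) : Prop := out = find_gap_that_fits_alt file_table size
instance (file_table : List String) (size : Int) (out : Int) : Decidable (Spec_find_gap_that_fits file_table size out) := by unfold Spec_find_gap_that_fits; infer_instance

-- ===== CLAIM (what is proved, stated in full; the proofs are below) =====
def Claim_equal_find_gap_that_fits : Prop := ∀ (file_table : List String) (size : Int), Dom_find_gap_that_fits file_table size → Spec_find_gap_that_fits file_table size (find_gap_that_fits file_table size)

-- ===== LEMMAS AND PROOFS =====

-- while scanning a block of dots with a started gap (gap_start = gs ≠ -1, gap_size = gz < size),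
-- A either returns gs (if the block completes the needed size) or exits the block with the state advanced
theorem pvA_dots (size : Int) (t : List String) (h : ∀ s ∈ t, s = ".") :
    ∀ (rest : List String) (pos gs gz : Int), gs ≠ -1 → gz < size →
    pvAGo size (t ++ rest) pos gs gz =
      if size ≤ gz + (t.length : Int) then gs
      else pvAGo size rest (pos + (t.length : Int)) gs (gz + (t.length : Int)) := by
  induction t with
  | nil =>
    intro rest pos gs gz _ hlt
    simp only [List.nil_append, List.length_nil, Int.natCast_zero, add_zero]
    rw [if_neg (by omega)]
  | cons s t ih =>
    intro rest pos gs gz hgs hlt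
    have hs : s = "." := h s (by simp)
    subst hs
    simp only [List.cons_append, pvAGo, beq_self_eq_true, if_true]
    rw [if_neg (show ¬ ((gs == -1) = true) by simpa using hgs)]
    by_cases hret : size ≤ gz + 1
    · rw [if_pos hret, if_pos (by simp only [List.length_cons]; push_cast; omega)]
    · rw [if_neg hret, ih (fun s hs => h s (by simp [hs])) rest (pos + 1) gs (gz + 1) hgs (by omega)]
      by_cases h2 : size ≤ gz + ((t.length : Int) + 1)
      · rw [if_pos (by omega), if_pos (by simp only [List.length_cons]; push_cast; omega)]
      · rw [if_neg (by omega), if_neg (by simp only [List.length_cons]; push_cast; omega)]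
        congr 1 <;> simp only [List.length_cons] <;> push_cast <;> ring

-- a block of non-dots only resets A's state and advances the index
theorem pvA_nondots (size : Int) (t : List String) (h : ∀ s ∈ t, s ≠ ".") :
    ∀ (rest : List String) (pos : Int),
    pvAGo size (t ++ rest) pos (-1) 0 = pvAGo size rest (pos + (t.length : Int)) (-1) 0 := by
  induction t with
  | nil => intro rest pos; simp
  | cons s t ih =>
    intro rest pos
    have hs : s ≠ "." := h s (by simp)
    simp only [List.cons_append, pvAGo]
    rw [if_neg (by simpa using hs)]
    rw [ih (fun s hs' => h s (by simp [hs'])) rest (pos + 1)]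
    congr 1
    simp only [List.length_cons]; push_cast; omega

-- A's carried state is irrelevant when the next element is not a dot (or the list ends)
theorem pvA_state_irrel (size : Int) (d : List String) (pos gs gz : Int)
    (h : d = [] ∨ ∃ y ys, d = y :: ys ∧ y ≠ ".") :
    pvAGo size d pos gs gz = pvAGo size d pos (-1) 0 := by
  rcases h with h | ⟨y, ys, rfl, hy⟩
  · subst h; rfl
  · simp only [pvAGo]
    rw [if_neg (by simpa using hy), if_neg (by simpa using hy)]

theorem pvDropWhile_head {p : String → Bool} :
    ∀ (l : List String) (y : String) (ys : List String), l.dropWhile p = y :: ys → p y = false := by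
  intro l
  induction l with
  | nil => intro y ys h; simp [List.dropWhile] at h
  | cons x xs ih =>
    intro y ys h
    rw [List.dropWhile_cons] at h
    by_cases hp : p x
    · rw [if_pos hp] at h; exact ih y ys h
    · rw [if_neg hp] at h
      obtain ⟨h1, _⟩ := List.cons.inj h
      subst h1; simpa using hp

theorem pvMain (size : Int) :
    ∀ (n : Nat) (l : List String) (pos : Int), l.length ≤ n → 0 ≤ pos →
    pvAGo size l pos (-1) 0 = pvBGo size l pos := by
  intro n
  induction n with
  | zero =>
    intro l pos hl _
    have : l = [] := List.eq_nil_of_length_eq_zero (Nat.le_zero.mp hl)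
    subst this; simp [pvAGo, pvBGo]
  | succ n ih =>
    intro l pos hl hpos
    cases l with
    | nil => simp [pvAGo, pvBGo]
    | cons x xs =>
      have hxs : xs.length ≤ n := by simpa using Nat.succ_le_succ_iff.mp hl
      by_cases hx : x = "."
      · subst hx
        have hsplit : xs = xs.takeWhile (fun s => s == ".") ++ xs.dropWhile (fun s => s == ".") :=
          (List.takeWhile_append_dropWhile).symm
        set t := xs.takeWhile (fun s => s == ".") with ht
        set d := xs.dropWhile (fun s => s == ".") with hd
        have hmem : ∀ s ∈ t, s = "." := by
          intro s hs
          have := List.mem_takeWhile_imp hs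
          simpa using this
        rw [pvBGo]
        simp only [beq_self_eq_true, Bool.true_and, decide_eq_true_eq]
        rw [pvAGo]
        simp only [beq_self_eq_true, if_true, zero_add]
        by_cases h1 : size ≤ (1 : Int)
        · rw [if_pos h1, if_pos (by have : (0:Int) ≤ (t.length : Int) := Int.natCast_nonneg _; omega)]
        · rw [if_neg h1]
          conv_lhs => rw [hsplit]
          rw [pvA_dots size t hmem d (pos + 1) pos 1 (by omega) (by omega)]
          by_cases h2 : size ≤ 1 + (t.length : Int)
          · rw [if_pos (by omega), if_pos h2]
          · rw [if_neg (by omega), if_neg h2]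
            have hdlen : d.length ≤ n :=
              le_trans (by simpa [hd] using List.length_dropWhile_le (fun s => s == ".") xs) hxs
            have hform : d = [] ∨ ∃ y ys, d = y :: ys ∧ y ≠ "." := by
              cases hdc : d with
              | nil => exact Or.inl rfl
              | cons y ys =>
                refine Or.inr ⟨y, ys, rfl, ?_⟩
                have := pvDropWhile_head (p := fun s => s == ".") xs y ys (hd ▸ hdc)
                simpa using this
            rw [pvA_state_irrel size d (pos + 1 + (t.length : Int)) pos (1 + (t.length : Int)) hform]
            rw [ih d (pos + 1 + (t.length : Int)) hdlen (by have : (0:Int) ≤ (t.length : Int) := Int.natCast_nonneg _; omega)]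
            congr 1
            ring
      · have hsplit : xs = xs.takeWhile (fun s => s == x) ++ xs.dropWhile (fun s => s == x) :=
          (List.takeWhile_append_dropWhile).symm
        set t := xs.takeWhile (fun s => s == x) with ht
        set d := xs.dropWhile (fun s => s == x) with hd
        have hmem : ∀ s ∈ t, s ≠ "." := by
          intro s hs
          have := List.mem_takeWhile_imp hs
          have hsx : s = x := by simpa using this
          simpa [hsx] using hx
        rw [pvBGo]
        rw [pvAGo, if_neg (by simpa using hx)]
        rw [if_neg (by simp [hx])]
        conv_lhs => rw [hsplit]
        rw [pvA_nondots size t hmem d (pos + 1)]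
        have hdlen : d.length ≤ n :=
          le_trans (by simpa [hd] using List.length_dropWhile_le (fun s => s == x) xs) hxs
        rw [ih d (pos + 1 + (t.length : Int)) hdlen (by have : (0:Int) ≤ (t.length : Int) := Int.natCast_nonneg _; omega)]
        congr 1
        ring

-- ===== VERDICT (by name: the statement is the Claim_ definition above) =====
theorem find_gap_that_fits_spec : Claim_equal_find_gap_that_fits := by
  intro file_table size _h
  unfold Spec_find_gap_that_fits find_gap_that_fits find_gap_that_fits_alt
  exact pvMain size file_table.length file_table 0 le_rfl le_rfl
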